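-- pv_equiv track=rewrite | github.com/Francesco-Sovrano/CRExperiment | results_analysis/parse_magix_logs.py | build_questionnaire_row
-- ===== SOURCE A (Python) =====
-- questionnaire_labels_map = {
-- 	"prolific_id": "Prolific ID",
-- 	"question_pre1": "How would you rate your overall attitude toward Artificial Intelligence (AI)?",
-- 	"question_pre2": "How much do you trust AI systems in general?",
-- 	"question_pre3": "What is one word or phrase that describes how you feel about AI?",
-- 	"post1": "What is your gender?",
-- 	"question_age": "What is your Age?",
-- 	"post2": "How familiar are you with Artificial Intelligence (AI)?",
-- 	"question_post3": "Your profession or role:",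
-- 	"post9": "Do you have any feedback about the AI output, the explanation, or the task itself?",
-- }
--
-- def build_questionnaire_row(records_after, prolific_id_value):
-- 	"""
-- 	Build questionnaire row from records_after.
-- 	If multiple entries for a field exist, take the last occurrence.
-- 	"""
-- 	row = {"prolific_id": prolific_id_value}
-- 	target = set(questionnaire_labels_map.keys()) - {"prolific_id"}
-- 	last_values = {}
-- 	for _, key, val in records_after:
-- 		if key in target:
-- 			last_values[key] = val
-- 	row.update(last_values)
-- 	return row
-- ===== SOURCE B (Python) =====
-- questionnaire_labels_map = {
-- 	"prolific_id": "Prolific ID",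
-- 	"question_pre1": "How would you rate your overall attitude toward Artificial Intelligence (AI)?",
-- 	"question_pre2": "How much do you trust AI systems in general?",
-- 	"question_pre3": "What is one word or phrase that describes how you feel about AI?",
-- 	"post1": "What is your gender?",
-- 	"question_age": "What is your Age?",
-- 	"post2": "How familiar are you with Artificial Intelligence (AI)?",
-- 	"question_post3": "Your profession or role:",
-- 	"post9": "Do you have any feedback about the AI output, the explanation, or the task itself?",
-- }
--
-- def build_questionnaire_row(records_after, prolific_id_value):
-- 	"""
-- 	Build questionnaire row from records_after.
-- 	Each questionnaire field is added once, in order of first appearance,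
-- 	with its most recent (last) recorded value.
-- 	"""
-- 	records = list(records_after)
-- 	row = {"prolific_id": prolific_id_value}
-- 	for _, key, _ in records:
-- 		if key in questionnaire_labels_map and key != "prolific_id" and key not in row:
-- 			row[key] = [v for _, k, v in records if k == key][-1]
-- 	return row
-- ===== Notes on version B (the rewrite author's own statement) =====
-- stated objective: alternative
-- what changed: Instead of A's single overwrite pass that builds a separate last-values dict and merges it into the row, B adds each questionnaire field once, at its first appearance, taking its most recent value by a dedicated scan of the records for that key.
import Mathlib
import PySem

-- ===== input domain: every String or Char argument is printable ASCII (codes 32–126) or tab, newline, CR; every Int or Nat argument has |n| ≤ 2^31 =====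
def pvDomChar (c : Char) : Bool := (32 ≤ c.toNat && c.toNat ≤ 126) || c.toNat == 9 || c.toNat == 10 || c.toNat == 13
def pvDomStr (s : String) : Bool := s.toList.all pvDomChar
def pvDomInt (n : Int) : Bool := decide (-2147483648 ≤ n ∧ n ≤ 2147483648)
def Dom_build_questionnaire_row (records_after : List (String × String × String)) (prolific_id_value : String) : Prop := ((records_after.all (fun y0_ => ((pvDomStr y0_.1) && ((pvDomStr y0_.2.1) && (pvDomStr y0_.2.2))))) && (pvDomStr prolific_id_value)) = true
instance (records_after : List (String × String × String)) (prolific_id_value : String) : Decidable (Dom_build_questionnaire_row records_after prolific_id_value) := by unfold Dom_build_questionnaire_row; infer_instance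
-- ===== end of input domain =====

-- B replaces A's overwrite-dict pass (last-values dict + row.update) by a per-field scheme:
-- each questionnaire field is added once, at its first appearance, with its last recorded
-- value found by a scan of the records (objective: alternative; not faster).

def questionnaire_labels_map : PySem.Dict String String := PySem.Dict.ofList
  [ ("prolific_id", "Prolific ID"),
    ("question_pre1", "How would you rate your overall attitude toward Artificial Intelligence (AI)?"),
    ("question_pre2", "How much do you trust AI systems in general?"),
    ("question_pre3", "What is one word or phrase that describes how you feel about AI?"),
    ("post1", "What is your gender?"),
    ("question_age", "What is your Age?"),
    ("post2", "How familiar are you with Artificial Intelligence (AI)?"),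
    ("question_post3", "Your profession or role:"),
    ("post9", "Do you have any feedback about the AI output, the explanation, or the task itself?") ]

-- ===== PORT A =====
def build_questionnaire_row (records_after : List (String × String × String)) (prolific_id_value : String) : List (String × String) :=
  let row : PySem.Dict String String := PySem.Dict.ofList [("prolific_id", prolific_id_value)]
  let target : PySem.Set String :=
    PySem.Set.diff (PySem.Set.ofList (PySem.Dict.keys questionnaire_labels_map)) (PySem.Set.ofList ["prolific_id"])
  let last_values : PySem.Dict String String :=
    records_after.foldl
      (fun d r => if PySem.Set.contains target r.2.1 then d.insert r.2.1 r.2.2 else d)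
      PySem.Dict.empty
  (PySem.Dict.update row last_values.items).items

-- ===== PORT B =====
-- '[v for _, k, v in records if k == key][-1]' is ported as pyGetD … (-1) "": the default is
-- unreachable since the current record itself matches the filter.
def build_questionnaire_row_alt (records_after : List (String × String × String)) (prolific_id_value : String) : List (String × String) :=
  let records := records_after
  let row0 : PySem.Dict String String := PySem.Dict.ofList [("prolific_id", prolific_id_value)]
  (records.foldl
    (fun row t =>
      if (questionnaire_labels_map.contains t.2.1 && !(t.2.1 == "prolific_id")) && !(row.contains t.2.1)
      then row.insert t.2.1
             (PySem.List.pyGetD ((records.filter (fun u => u.2.1 == t.2.1)).map (fun u => u.2.2)) (-1) "")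
      else row)
    row0).items

-- ===== PRECONDITION & SPEC =====
def Spec_build_questionnaire_row (records_after : List (String × String × String)) (prolific_id_value : String) (out : List (String × String)) : Prop := out = build_questionnaire_row_alt records_after prolific_id_value
instance (records_after : List (String × String × String)) (prolific_id_value : String) (out : List (String × String)) : Decidable (Spec_build_questionnaire_row records_after prolific_id_value out) := by unfold Spec_build_questionnaire_row; infer_instance

-- ===== CLAIM (what is proved, stated in full; the proofs are below) =====
def Claim_equal_build_questionnaire_row : Prop := ∀ (records_after : List (String × String × String)) (prolific_id_value : String), Dom_build_questionnaire_row records_after prolific_id_value → Spec_build_questionnaire_row records_after prolific_id_value (build_questionnaire_row records_after prolific_id_value)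

-- ===== LEMMAS AND PROOFS =====

-- A's guarded insert loop over records is the plain insert loop over the filtered key/value pairs.
theorem foldl_insert_guard (c : String → Bool) :
    ∀ (recs : List (String × String × String)) (d : PySem.Dict String String),
    recs.foldl (fun d r => if c r.2.1 then d.insert r.2.1 r.2.2 else d) d
      = ((recs.filter (fun r => c r.2.1)).map (fun r => (r.2.1, r.2.2))).foldl
          (fun d p => d.insert p.1 p.2) d := by
  intro recs
  induction recs with
  | nil => intro d; rfl
  | cons r recs ih =>
      intro d
      by_cases h : c r.2.1 = true
      · simp [h, ih]
      · simp [h, ih]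

-- lookup after an insert loop: the LAST value for the key, else the starting dict's value
theorem getD_foldl_insert :
    ∀ (L : List (String × String)) (d : PySem.Dict String String) (k : String) (dflt : String),
    (L.foldl (fun d p => d.insert p.1 p.2) d).getD k dflt
      = ((L.filter (fun p => p.1 == k)).map (·.2)).getLastD (d.getD k dflt) := by
  intro L
  induction L with
  | nil => intro d k dflt; rfl
  | cons p L ih =>
      intro d k dflt
      rw [List.foldl_cons]
      by_cases h : p.1 = k
      · subst h
        rw [List.filter_cons_of_pos (by simp), List.map_cons, List.getLastD_cons, ih,
            PySem.Dict.getD_insert_self]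
      · rw [List.filter_cons_of_neg (by simpa using h), ih,
            PySem.Dict.getD_insert_of_ne _ _ _ (fun hk => h hk.symm)]

-- filtering commutes with Python's ordered dedup (= PySem.Set.ofList)
theorem ofList_filter (p : String → Bool) :
    ∀ (S : List String), (PySem.Set.ofList S).filter p = PySem.Set.ofList (S.filter p) := by
  intro S
  induction S with
  | nil => rfl
  | cons x S ih =>
      have hdis : ∀ (l : List String), PySem.Set.discard l x = l.filter (fun y => !(y == x)) :=
        fun l => rfl
      by_cases hp : p x = true
      · rw [PySem.Set.ofList_cons, List.filter_cons_of_pos hp, List.filter_cons_of_pos hp,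
            PySem.Set.ofList_cons, hdis, hdis, List.filter_comm, ih]
      · rw [PySem.Set.ofList_cons, List.filter_cons_of_neg hp, List.filter_cons_of_neg hp,
            hdis, List.filter_comm, ih]
        apply List.filter_eq_self.mpr
        intro y hy
        have hyp : p y = true := List.of_mem_filter ((PySem.Set.mem_ofList _ y).mp hy)
        have : y ≠ x := fun h => hp (h ▸ hyp)
        simpa using this

-- dedup of a cons: head first, then the dedup of the tail with the head removed
theorem dedup_cons (k : String) (S : List String) :
    PySem.List.dedup (k :: S) = k :: PySem.List.dedup (S.filter (fun j => !(j == k))) := by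
  rw [PySem.List.dedup_eq_ofList, PySem.List.dedup_eq_ofList, PySem.Set.ofList_cons]
  have hdis : PySem.Set.discard (PySem.Set.ofList S) k
      = (PySem.Set.ofList S).filter (fun y => !(y == k)) := rfl
  rw [hdis, ofList_filter]

-- a first-occurrence-guarded insert loop appends one item per fresh key, in first-occurrence order
theorem guarded_items (p : String → Bool) (g : String → String) :
    ∀ (ks : List String) (r : PySem.Dict String String), r.keys.Nodup →
    (ks.foldl (fun r k => if p k && !(r.contains k) then r.insert k (g k) else r) r).items
      = r.items ++ (PySem.List.dedup (ks.filter (fun k => p k && !(r.contains k)))).map (fun k => (k, g k)) := by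
  intro ks
  induction ks with
  | nil => intro r _; simp [PySem.List.dedup_eq_ofList, PySem.Set.ofList_nil]
  | cons k ks ih =>
      intro r hnd
      rw [List.foldl_cons]
      by_cases h : (p k && !(r.contains k)) = true
      · have hck : r.contains k = false := by
          have := h; simp only [Bool.and_eq_true, Bool.not_eq_true'] at this; exact this.2
        have h' : (fun j => p j && !(r.contains j)) k = true := by simpa using h
        rw [if_pos h, ih (r.insert k (g k)) (PySem.Dict.nodup_keys_insert r k (g k) hnd),
            PySem.Dict.items_insert_of_not_contains r (g k) hck,
            show List.filter (fun j => p j && !(r.contains j)) (k :: ks)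
                = k :: List.filter (fun j => p j && !(r.contains j)) ks from List.filter_cons_of_pos h',
            dedup_cons]
        have hfilt : ks.filter (fun j => p j && !((r.insert k (g k)).contains j))
            = (ks.filter (fun j => p j && !(r.contains j))).filter (fun j => !(j == k)) := by
          rw [List.filter_filter]
          apply List.filter_congr
          intro j _
          rw [PySem.Dict.contains_insert]
          cases hjk : (j == k) <;> cases hpj : p j <;> cases hcj : r.contains j <;> simp
        rw [hfilt, List.map_cons, List.append_assoc]
        rfl
      · rw [if_neg h, List.filter_cons_of_neg (by simpa using h)]
        exact ih r hnd

-- Python's lst[-1] with a default is the last element with that default, for every list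
theorem pyGetD_neg_one_total (l : List String) (d : String) :
    PySem.List.pyGetD l (-1) d = l.getLastD d := by
  cases l with
  | nil => rfl
  | cons x xs =>
      rw [PySem.List.pyGetD_neg_one (x :: xs) d (by simp),
          List.getLastD_eq_getLast?, List.getLast?_eq_some_getLast (by simp)]
      rfl

theorem build_questionnaire_row_eq (records_after : List (String × String × String)) (prolific_id_value : String) :
    build_questionnaire_row records_after prolific_id_value
      = build_questionnaire_row_alt records_after prolific_id_value := by
  unfold build_questionnaire_row build_questionnaire_row_alt
  have htarget : (PySem.Set.diff (PySem.Set.ofList (PySem.Dict.keys questionnaire_labels_map)) (PySem.Set.ofList ["prolific_id"]))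
      = (PySem.Dict.keys questionnaire_labels_map).filter (fun k => !(k == "prolific_id")) := by rfl
  simp only [htarget, PySem.Set.contains_eq_listContains]
  set cA : String → Bool := fun k => ((PySem.Dict.keys questionnaire_labels_map).filter (fun j => !(j == "prolific_id"))).contains k with hcA
  set cB : String → Bool := fun k => questionnaire_labels_map.contains k && !(k == "prolific_id") with hcB
  set row0 : PySem.Dict String String := PySem.Dict.ofList [("prolific_id", prolific_id_value)] with hrow0
  -- the two membership tests agree
  have hAB : ∀ k, cA k = cB k := by
    intro k
    rw [hcA, hcB]
    by_cases hpid : k = "prolific_id"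
    · subst hpid; decide
    · simp [hpid, PySem.Dict.contains_eq_decide_mem_keys, List.mem_filter]
  -- ===== A side =====
  set L : List (String × String) := ((records_after.filter (fun r => cA r.2.1)).map (fun r => (r.2.1, r.2.2))) with hL
  rw [foldl_insert_guard cA]
  set D : PySem.Dict String String := L.foldl (fun d p => d.insert p.1 p.2) PySem.Dict.empty with hD
  have hndD : D.keys.Nodup := by
    rw [hD]
    exact PySem.Dict.nodup_keys_foldl_insert_key L Prod.fst (fun _ p => p.2) _ (by simp)
  have hkeysD : D.keys = PySem.List.dedup (L.map (·.1)) := by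
    rw [hD, PySem.Dict.keys_foldl_insert_key L Prod.fst (fun _ p => p.2)]
    simp [PySem.Dict.keys_empty, PySem.Set.update_nil_left, PySem.List.dedup_eq_ofList]
  have hupd : PySem.Dict.update row0 D.items = D.items.foldl (fun d p => d.insert p.1 p.2) row0 := rfl
  have hLfst : L.map (·.1) = (records_after.filter (fun r => cA r.2.1)).map (fun r => r.2.1) := by
    rw [hL, List.map_map]; rfl
  have hfreshA : ∀ k ∈ PySem.List.dedup (L.map (·.1)), row0.contains k = false := by
    intro k hk
    have hkL := (PySem.List.mem_dedup _ k).mp hk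
    rw [hLfst, List.mem_map] at hkL
    obtain ⟨r, hr, hrk⟩ := hkL
    have hcAr : cA r.2.1 = true := by
      have := List.mem_filter.mp hr
      exact this.2
    have hcAk : cA k = true := hrk ▸ hcAr
    have hne : k ≠ "prolific_id" := by
      rw [hcA] at hcAk
      have hmem := List.mem_filter.mp (List.contains_iff_mem.mp hcAk)
      simpa using hmem.2
    rw [hrow0]
    have : PySem.Dict.ofList [("prolific_id", prolific_id_value)]
        = PySem.Dict.mk [("prolific_id", prolific_id_value)] := rfl
    rw [this, PySem.Dict.contains_mk]
    simpa using fun h => hne h.symm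
  have hAitems : (PySem.Dict.update row0 D.items).items
      = row0.items ++ (PySem.List.dedup (L.map (·.1))).map (fun k => (k, D.getD k "")) := by
    rw [hupd, PySem.Dict.items_eq_map_keys D hndD "", hkeysD, List.foldl_map]
    have := PySem.Dict.items_foldl_insert_fresh (PySem.List.dedup (L.map (·.1))) (fun k => k)
      (fun k => D.getD k "") row0 hfreshA (by simp)
    simpa using this
  rw [hAitems]
  -- ===== B side =====
  have hfoldB : records_after.foldl
      (fun row t => if (questionnaire_labels_map.contains t.2.1 && !(t.2.1 == "prolific_id")) && !(row.contains t.2.1)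
        then row.insert t.2.1 (PySem.List.pyGetD ((records_after.filter (fun u => u.2.1 == t.2.1)).map (fun u => u.2.2)) (-1) "") else row) row0
      = (records_after.map (fun t => t.2.1)).foldl
          (fun row k => if cB k && !(row.contains k)
            then row.insert k (PySem.List.pyGetD ((records_after.filter (fun u => u.2.1 == k)).map (fun u => u.2.2)) (-1) "") else row) row0 := by
    rw [List.foldl_map]
  have hnod0 : row0.keys.Nodup := by
    have : row0.keys = ["prolific_id"] := rfl
    rw [this]; exact List.nodup_singleton _
  rw [hfoldB, guarded_items cB
      (fun k => PySem.List.pyGetD ((records_after.filter (fun u => u.2.1 == k)).map (fun u => u.2.2)) (-1) "")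
      (records_after.map (fun t => t.2.1)) row0 hnod0]
  -- the row0-freshness conjunct in B's filter is subsumed by cB
  have hpredB : (fun k => cB k && !(row0.contains k)) = cB := by
    funext k
    have hc : row0.contains k = ("prolific_id" == k) := by
      rw [hrow0]
      have : PySem.Dict.ofList [("prolific_id", prolific_id_value)]
          = PySem.Dict.mk [("prolific_id", prolific_id_value)] := rfl
      rw [this, PySem.Dict.contains_mk]; simp
    rw [hc, hcB]
    by_cases hpid : k = "prolific_id"
    · subst hpid; simp
    · have h2 : ("prolific_id" == k) = false :=
        beq_eq_false_iff_ne.mpr (fun h => hpid (Eq.symm h))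
      simp [h2]
  rw [hpredB]
  -- same key sequence
  have hkeysAB : L.map (·.1) = (records_after.map (fun t => t.2.1)).filter cB := by
    rw [hLfst, List.filter_map, List.filter_congr (fun r _ => hAB r.2.1)]
    rfl
  rw [hkeysAB]
  -- same values on those keys
  apply congrArg (fun z => row0.items ++ z)
  apply List.map_congr_left
  intro k hk
  have hcBk : cB k = true := by
    have := (PySem.List.mem_dedup _ k).mp hk
    exact List.of_mem_filter this
  have hcAk : cA k = true := (hAB k).symm ▸ hcBk
  have hval : D.getD k ""
      = PySem.List.pyGetD ((records_after.filter (fun u => u.2.1 == k)).map (fun u => u.2.2)) (-1) "" := by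
    rw [hD, getD_foldl_insert, pyGetD_neg_one_total]
    have hemp : (PySem.Dict.empty : PySem.Dict String String).getD k "" = "" := rfl
    rw [hemp]
    have hLfilt : L.filter (fun p => p.1 == k)
        = ((records_after.filter (fun r => cA r.2.1)).filter (fun u => u.2.1 == k)).map (fun r => (r.2.1, r.2.2)) := by
      rw [hL, List.filter_map]; rfl
    have hff : (records_after.filter (fun r => cA r.2.1)).filter (fun u => u.2.1 == k)
        = records_after.filter (fun u => u.2.1 == k) := by
      rw [List.filter_filter]
      apply List.filter_congr
      intro u _
      cases h2 : (u.2.1 == k)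
      · simp
      · have : u.2.1 = k := eq_of_beq h2
        simp [this, hcAk]
    rw [hLfilt, hff, List.map_map]
    rfl
  rw [hval]

-- ===== VERDICT (by name: the statement is the Claim_ definition above) =====
theorem build_questionnaire_row_spec : Claim_equal_build_questionnaire_row := by
  intro records_after prolific_id_value _
  unfold Spec_build_questionnaire_row
  exact build_questionnaire_row_eq records_after prolific_id_value
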